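-- pv_equiv track=rewrite | github.com/SahebSandhuSingh/FixGoblin | patch_generator.py | _optimize_bubble_sort_loop
-- ===== SOURCE A (Python) =====
-- from typing import Dict, List, Any, Optional
--
-- def _optimize_bubble_sort_loop(lines: List[str], error_data: Dict[str, Any]) -> Optional[str]:
--     """
--     Optimize bubble sort by improving the inner loop range.
--     Changes range(0, n-i-1) to range(0, n-1-i) for better clarity,
--     or adds optimization to skip sorted elements.
--     """
--     # Look for bubble sort pattern
--     for i, line in enumerate(lines):
--         if "for" in line and "range" in line:
--             # Check if this is an inner loop (has another for loop before it)
--             is_inner_loop = False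
--             for j in range(max(0, i-5), i):
--                 if "for" in lines[j] and "range" in lines[j]:
--                     is_inner_loop = True
--                     break
--
--             if is_inner_loop:
--                 # Optimize: use range(n-1-i) instead of range(n-i-1) for clarity
--                 # Or add len(arr)-1-i optimization
--                 if "range(0," in line or "range(" in line:
--                     # Already optimized in correctness patches, add comment
--                     new_lines = lines.copy()
--                     indent = len(line) - len(line.lstrip())
--                     indent_str = " " * indent
--                     comment = f"{indent_str}# Optimized: each pass moves largest element to end\n"
--                     new_lines.insert(i, comment)
--                     return "".join(new_lines)
--
--     return None
-- ===== SOURCE B (Python) =====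
-- from typing import Dict, List, Any, Optional
--
-- def _optimize_bubble_sort_loop(lines: List[str], error_data: Dict[str, Any]) -> Optional[str]:
--     """Two stages: collect the indices of all for+range lines, then scan consecutive
--     index pairs for the first one at distance <= 5 whose second line passes the guard."""
--     idxs = [i for i, line in enumerate(lines) if "for" in line and "range" in line]
--     for prev, i in zip(idxs, idxs[1:]):
--         line = lines[i]
--         if i - prev <= 5 and ("range(0," in line or "range(" in line):
--             indent = len(line) - len(line.lstrip())
--             comment = " " * indent + "# Optimized: each pass moves largest element to end\n"
--             return "".join(lines[:i] + [comment] + lines[i:])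
--     return None
-- ===== Notes on version B (the rewrite author's own statement) =====
-- stated objective: alternative
-- what changed: B is a two-stage algorithm: it first collects the list of indices of all for+range lines, then scans consecutive index pairs for the first pair at distance <= 5 whose second line passes the guard, instead of A's per-line re-scan of the previous 5-line window.
import Mathlib
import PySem

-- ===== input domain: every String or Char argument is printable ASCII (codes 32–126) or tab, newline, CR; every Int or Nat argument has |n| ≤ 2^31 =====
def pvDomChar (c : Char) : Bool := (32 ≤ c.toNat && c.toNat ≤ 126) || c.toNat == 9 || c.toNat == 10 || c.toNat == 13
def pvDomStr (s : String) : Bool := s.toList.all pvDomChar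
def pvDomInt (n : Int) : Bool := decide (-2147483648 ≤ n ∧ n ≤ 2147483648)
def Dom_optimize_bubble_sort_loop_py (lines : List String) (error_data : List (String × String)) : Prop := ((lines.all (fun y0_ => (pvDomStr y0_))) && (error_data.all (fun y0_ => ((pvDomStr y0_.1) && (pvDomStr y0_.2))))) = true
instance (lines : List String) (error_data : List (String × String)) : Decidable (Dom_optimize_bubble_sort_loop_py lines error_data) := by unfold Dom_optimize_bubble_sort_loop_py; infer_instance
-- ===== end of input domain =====

-- B replaces A's per-line 5-line-window re-scan with two stages: collect all for+range
-- line indices, then scan consecutive index pairs for the first near pair (objective: alternative).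


-- ===== PORT A =====
-- "for" in line and "range" in line
def pvIsFR (s : String) : Bool := PySem.Str.isIn "for" s && PySem.Str.isIn "range" s

-- "range(0," in line or "range(" in line   (A's redundant guard, kept verbatim)
def pvGuard (s : String) : Bool := PySem.Str.isIn "range(0," s || PySem.Str.isIn "range(" s

-- indent computation and the comment string (identical expression in both Pythons)
def pvComment (line : String) : String :=
  String.ofList (List.replicate (PySem.Str.len line - PySem.Str.len (PySem.Str.lstrip line)).toNat ' ') ++
    "# Optimized: each pass moves largest element to end\n"

-- inner loop of A: for j in range(max(0, i-5), i): if for+range in lines[j]: flag, break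
def pvInnerA (lines : List String) (i : Nat) : Bool :=
  (PySem.List.pyRange (max 0 ((i : Int) - 5)) (i : Int) 1).any
    (fun j => pvIsFR (PySem.List.pyGetD lines j ""))

-- outer loop of A over enumerate(lines): rest = lines.drop i
def pvGoA (lines : List String) : Nat → List String → Option String
  | _, [] => none
  | i, line :: rest =>
    if pvIsFR line then
      if pvInnerA lines i then
        if pvGuard line then
          some (PySem.Str.join "" (PySem.List.insert lines (i : Int) (pvComment line)))
        else pvGoA lines (i+1) rest
      else pvGoA lines (i+1) rest
    else pvGoA lines (i+1) rest

def optimize_bubble_sort_loop_py (lines : List String) (_error_data : List (String × String)) : Option String :=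
  pvGoA lines 0 lines

-- ===== PORT B =====
-- idxs = [i for i, line in enumerate(lines) if "for" in line and "range" in line]
def pvIdxs (lines : List String) : List Int :=
  (PySem.List.enumerate lines 0).filterMap (fun p => if pvIsFR p.2 then some p.1 else none)

-- for prev, i in zip(idxs, idxs[1:]): …   (structural recursion on the index list)
def pvPairs (lines : List String) : List Int → Option String
  | [] => none
  | [_] => none
  | prev :: i :: rest =>
    if decide (i - prev ≤ 5) && pvGuard (PySem.List.pyGetD lines i "") then
      some (PySem.Str.join "" (PySem.List.slice lines none (some i) ++
             pvComment (PySem.List.pyGetD lines i "") :: PySem.List.slice lines (some i) none))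
    else pvPairs lines (i :: rest)

def optimize_bubble_sort_loop_py_alt (lines : List String) (_error_data : List (String × String)) : Option String :=
  pvPairs lines (pvIdxs lines)

-- ===== PRECONDITION & SPEC =====
def Spec_optimize_bubble_sort_loop_py (lines : List String) (error_data : List (String × String)) (out : Option String) : Prop := out = optimize_bubble_sort_loop_py_alt lines error_data
instance (lines : List String) (error_data : List (String × String)) (out : Option String) : Decidable (Spec_optimize_bubble_sort_loop_py lines error_data out) := by unfold Spec_optimize_bubble_sort_loop_py; infer_instance

-- ===== CLAIM (what is proved, stated in full; the proofs are below) =====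
def Claim_equal_optimize_bubble_sort_loop_py : Prop := ∀ (lines : List String) (error_data : List (String × String)), Dom_optimize_bubble_sort_loop_py lines error_data → Spec_optimize_bubble_sort_loop_py lines error_data (optimize_bubble_sort_loop_py lines error_data)

-- ===== LEMMAS AND PROOFS =====

-- proof-side intermediate: the single-pass form of A carrying the last for+range index
def pvNear (last : Option Nat) (i : Nat) : Bool :=
  match last with
  | some l => decide (i - l ≤ 5)
  | none => false

def pvGoOld (lines : List String) : Nat → Option Nat → List String → Option String
  | _, _, [] => none
  | i, last, line :: rest =>
    if pvIsFR line then
      if pvNear last i then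
        if pvGuard line then
          some (PySem.Str.join "" (PySem.List.slice lines none (some (i : Int)) ++
                 pvComment line :: PySem.List.slice lines (some (i : Int)) none))
        else pvGoOld lines (i+1) (some i) rest
      else pvGoOld lines (i+1) (some i) rest
    else pvGoOld lines (i+1) last rest

-- invariant: last = the greatest index < i of a for+range line (none if there is none)
def pvInv (lines : List String) (i : Nat) (last : Option Nat) : Prop :=
  (∀ l, last = some l → l < i ∧ pvIsFR (lines.getD l "") = true) ∧
  (∀ j, j < i → pvIsFR (lines.getD j "") = true → ∃ l, last = some l ∧ j ≤ l)

lemma pvInnerA_eq_near (lines : List String) (i : Nat) (last : Option Nat)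
    (hinv : pvInv lines i last) :
    pvInnerA lines i = pvNear last i := by
  obtain ⟨h1, h2⟩ := hinv
  by_cases h : pvNear last i = true
  · rw [h]
    cases last with
    | none => simp [pvNear] at h
    | some l =>
      simp only [pvNear, decide_eq_true_eq] at h
      obtain ⟨hl, hP⟩ := h1 l rfl
      rw [pvInnerA, List.any_eq_true]
      refine ⟨(l : Int), ?_, ?_⟩
      · rw [PySem.List.mem_pyRange_one]; omega
      · rwa [PySem.List.pyGetD_natCast]
  · rw [eq_false_of_ne_true h]
    rw [pvInnerA]
    rw [Bool.eq_false_iff, Ne, List.any_eq_true]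
    rintro ⟨j, hj, hPj⟩
    rw [PySem.List.mem_pyRange_one] at hj
    have hj0 : 0 ≤ j := le_trans (le_max_left 0 _) hj.1
    obtain ⟨k, rfl⟩ : ∃ k : Nat, j = (k : Int) := ⟨j.toNat, (Int.toNat_of_nonneg hj0).symm⟩
    rw [PySem.List.pyGetD_natCast] at hPj
    obtain ⟨l, hl, hkl⟩ := h2 k (by omega) hPj
    obtain ⟨hl', _⟩ := h1 l hl
    apply h
    subst hl
    simp only [pvNear, decide_eq_true_eq]
    omega

lemma pvGo_eq (lines : List String) : ∀ (rest : List String) (i : Nat) (last : Option Nat),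
    lines.drop i = rest → pvInv lines i last →
    pvGoA lines i rest = pvGoOld lines i last rest := by
  intro rest
  induction rest with
  | nil => intro i last _ _; rfl
  | cons line rest ih =>
    intro i last hdrop hinv
    have hi : i < lines.length := by
      by_contra h
      rw [List.drop_eq_nil_of_le (by omega)] at hdrop
      simp at hdrop
    have hline : lines.getD i "" = line := by
      have h0 : (List.drop i lines)[0]? = lines[i + 0]? := List.getElem?_drop
      rw [hdrop] at h0
      simp only [List.getElem?_cons_zero, Nat.add_zero] at h0
      simp [List.getD, ← h0]
    have hdrop' : lines.drop (i+1) = rest := by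
      have h1 : List.drop 1 (List.drop i lines) = List.drop (i + 1) lines := List.drop_drop
      rw [hdrop] at h1
      simpa using h1.symm
    rw [pvGoA, pvGoOld]
    by_cases hP : pvIsFR line = true
    · rw [if_pos hP, if_pos hP]
      rw [pvInnerA_eq_near lines i last hinv]
      have hinv' : pvInv lines (i+1) (some i) := by
        constructor
        · intro l hl
          injection hl with hl; subst hl
          exact ⟨by omega, by rwa [hline]⟩
        · intro j hj _hPj
          exact ⟨i, rfl, by omega⟩
      by_cases hN : pvNear last i = true
      · rw [if_pos hN, if_pos hN]
        by_cases hG : pvGuard line = true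
        · rw [if_pos hG, if_pos hG]
          rw [PySem.List.insert_natCast lines i (pvComment line) (by omega),
            PySem.List.slice_to_natCast, PySem.List.slice_from_natCast]
        · rw [if_neg hG, if_neg hG]
          exact ih (i+1) (some i) hdrop' hinv'
      · rw [if_neg hN, if_neg hN]
        exact ih (i+1) (some i) hdrop' hinv'
    · rw [if_neg hP, if_neg hP]
      have hinv' : pvInv lines (i+1) last := by
        obtain ⟨h1, h2⟩ := hinv
        constructor
        · intro l hl; obtain ⟨hl1, hl2⟩ := h1 l hl; exact ⟨by omega, hl2⟩
        · intro j hj hPj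
          rcases Nat.lt_or_ge j i with hji | hji
          · exact h2 j hji hPj
          · have : j = i := by omega
            subst this
            rw [hline] at hPj
            exact absurd hPj hP
      exact ih (i+1) last hdrop' hinv'

-- proof-side: the index list of a suffix, by structural recursion
def pvIdxsAux : Int → List String → List Int
  | _, [] => []
  | s, line :: rest => if pvIsFR line then s :: pvIdxsAux (s+1) rest else pvIdxsAux (s+1) rest

lemma pvIdxs_eq_aux : ∀ (xs : List String) (s : Int),
    (PySem.List.enumerate xs s).filterMap (fun p => if pvIsFR p.2 then some p.1 else none)
      = pvIdxsAux s xs := by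
  intro xs
  induction xs with
  | nil => intro s; simp [PySem.List.enumerate_nil, pvIdxsAux]
  | cons line rest ih =>
    intro s
    rw [PySem.List.enumerate_cons, List.filterMap_cons, pvIdxsAux]
    by_cases hP : pvIsFR line = true <;> simp [hP, ih]

def pvWithLast (last : Option Nat) (xs : List Int) : List Int :=
  match last with
  | some l => (l : Int) :: xs
  | none => xs

lemma pvOld_eq_pairs (lines : List String) : ∀ (rest : List String) (i : Nat) (last : Option Nat),
    lines.drop i = rest →
    pvGoOld lines i last rest = pvPairs lines (pvWithLast last (pvIdxsAux (i : Int) rest)) := by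
  intro rest
  induction rest with
  | nil =>
    intro i last _
    cases last <;> rfl
  | cons line rest ih =>
    intro i last hdrop
    have hline : lines.getD i "" = line := by
      have h0 : (List.drop i lines)[0]? = lines[i + 0]? := List.getElem?_drop
      rw [hdrop] at h0
      simp only [List.getElem?_cons_zero, Nat.add_zero] at h0
      simp [List.getD, ← h0]
    have hdrop' : lines.drop (i+1) = rest := by
      have h1 : List.drop 1 (List.drop i lines) = List.drop (i + 1) lines := List.drop_drop
      rw [hdrop] at h1
      simpa using h1.symm
    have hcast : (i : Int) + 1 = ((i + 1 : Nat) : Int) := by push_cast; ring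
    have hget : PySem.List.pyGetD lines (i : Int) "" = line := by
      rw [PySem.List.pyGetD_natCast, hline]
    rw [pvGoOld, pvIdxsAux]
    by_cases hP : pvIsFR line = true
    · simp only [if_pos hP]
      cases last with
      | none =>
        rw [pvWithLast]
        rw [show pvNear none i = false from rfl, if_neg (by simp)]
        rw [ih (i+1) (some i) hdrop', pvWithLast, hcast]
      | some l =>
        rw [pvWithLast, pvPairs, hget]
        have hnear : (decide ((i : Int) - (l : Int) ≤ 5) && pvGuard line)
            = (pvNear (some l) i && pvGuard line) := by
          simp only [pvNear]
          have : ((i : Int) - (l : Int) ≤ 5) ↔ (i - l ≤ 5) := by omega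
          simp [this]
        rw [hnear]
        by_cases hN : pvNear (some l) i = true
        · by_cases hG : pvGuard line = true
          · rw [if_pos hN, if_pos hG, if_pos (by rw [hN, hG]; rfl)]
          · rw [if_pos hN, if_neg hG,
              if_neg (by rw [Bool.eq_false_iff.mpr hG, Bool.and_false]; simp)]
            rw [ih (i+1) (some i) hdrop', pvWithLast, hcast]
        · rw [if_neg hN,
            if_neg (by rw [Bool.eq_false_iff.mpr hN, Bool.false_and]; simp)]
          rw [ih (i+1) (some i) hdrop', pvWithLast, hcast]
    · rw [if_neg hP, if_neg hP]
      rw [ih (i+1) last hdrop', hcast]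

-- ===== VERDICT (by name: the statement is the Claim_ definition above) =====
theorem optimize_bubble_sort_loop_py_spec : Claim_equal_optimize_bubble_sort_loop_py := by
  intro lines error_data _hdom
  show optimize_bubble_sort_loop_py lines error_data = optimize_bubble_sort_loop_py_alt lines error_data
  rw [optimize_bubble_sort_loop_py, optimize_bubble_sort_loop_py_alt, pvIdxs, pvIdxs_eq_aux]
  rw [pvGo_eq lines lines 0 none (by simp) ⟨by simp, by omega⟩]
  have := pvOld_eq_pairs lines lines 0 none (by simp)
  rw [this, pvWithLast]
  norm_num
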